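-- pv_equiv track=rewrite | github.com/dusimonn/Transporting_Himalayan_Ponies | 3 - Finding Greedy Path.py | assign_pony_to_path
-- ===== SOURCE A (Python) =====
-- def assign_pony_to_path(elevations, path, capacities):
--     '''will output a list of pony assignments to
--     go on each segment of the given path'''
--
--     def sorted_pony_pairs(capacities):
--         '''will take the 3 pony types as input then output a list of
--         possible pony pairs/tuples and their elevation'''
--
--         # capacities = [small, medium, large] pony size,
--         # so need to find all possible combinations of pony_pairs
--         x = capacities[0]
--         y = capacities[1]
--         z = capacities[2]
--         pony_pairs = [(x, x), (x, y), (y, y), (x, z), (y, z), (z, z)]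
--
--         # Now need to sort the dictionary according to the sum of pairs,
--         # as y + y not always smaller than x + z
--         # If these 2 are equal, then put y + y first,
--         # as according to criterion 2 smaller differences are preferred
--         sorted_pd = (sorted(pony_pairs, key=lambda x: x[0] + x[1]))
--
--         return sorted_pd
--
--     def elevation_path(elevations, path):
--         '''will output a list of the relative elevation from the
--         former cell/village to the successive cell'''
--
--         relative_elevations = []
--
--         for i in range(len(path) - 1):
--             # accessing the elevation of a village: elevations[x val][y val]
--             successive_elevation = elevations[path[i + 1][0]][path[i + 1][1]]
--             former_elevation = elevations[path[i][0]][path[i][1]]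
--             relative_elevation = successive_elevation - former_elevation
--             relative_elevations.append(relative_elevation)
--
--         return relative_elevations
--
--     sorted_pd = sorted_pony_pairs(capacities)
--     relative_elevations = elevation_path(elevations, path)
--
--     def assigning_ponies(sorted_pd, relative_elevations):
--         '''will output a list of tuples containing the most
--         efficient pony pair for each segment of the path'''
--
--         result = []
--
--         for i in range(len(relative_elevations)):
--             # need to compare each sum sorted_pd to each elevation in
--             # relative_elevations, starting with the smallest sum
--             for pair in sorted_pd:
--                 if sum(pair) >= relative_elevations[i]:
--                     # if a value in sorted_pd is >= to the relative_elevation,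
--                     # that will be best pair for that segment of the journey
--                     result.append(pair)
--                     break
--                 elif sum(sorted_pd[-1]) < relative_elevations[i]:
--                     # if the sum of the largest pony pair is still lower than
--                     # the elevation for that segment, then select None
--                     result.append(None)
--                     break
--
--         return result
--
--     result = assigning_ponies(sorted_pd, relative_elevations)
--
--     return result
-- ===== SOURCE B (Python) =====
-- def assign_pony_to_path(elevations, path, capacities):
--     """Per segment, pick the cheapest eligible pony pair directly with
--     min(..., key=sum, default=None) over the unsorted pair list (no sort step)."""
--     x, y, z = capacities[0], capacities[1], capacities[2]
--     pony_pairs = [(x, x), (x, y), (y, y), (x, z), (y, z), (z, z)]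
--     result = []
--     for i in range(len(path) - 1):
--         e = (elevations[path[i + 1][0]][path[i + 1][1]]
--              - elevations[path[i][0]][path[i][1]])
--         eligible = [p for p in pony_pairs if p[0] + p[1] >= e]
--         result.append(min(eligible, key=lambda p: p[0] + p[1], default=None))
--     return result
-- ===== Notes on version B (the rewrite author's own statement) =====
-- stated objective: simpler
-- what changed: B removes A's sort-then-linear-scan: instead of sorting the six pony pairs by sum and scanning for the first pair large enough, B picks each segment's pair directly as min(eligible pairs, key=sum, default=None) over the unsorted pair list.
import Mathlib
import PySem

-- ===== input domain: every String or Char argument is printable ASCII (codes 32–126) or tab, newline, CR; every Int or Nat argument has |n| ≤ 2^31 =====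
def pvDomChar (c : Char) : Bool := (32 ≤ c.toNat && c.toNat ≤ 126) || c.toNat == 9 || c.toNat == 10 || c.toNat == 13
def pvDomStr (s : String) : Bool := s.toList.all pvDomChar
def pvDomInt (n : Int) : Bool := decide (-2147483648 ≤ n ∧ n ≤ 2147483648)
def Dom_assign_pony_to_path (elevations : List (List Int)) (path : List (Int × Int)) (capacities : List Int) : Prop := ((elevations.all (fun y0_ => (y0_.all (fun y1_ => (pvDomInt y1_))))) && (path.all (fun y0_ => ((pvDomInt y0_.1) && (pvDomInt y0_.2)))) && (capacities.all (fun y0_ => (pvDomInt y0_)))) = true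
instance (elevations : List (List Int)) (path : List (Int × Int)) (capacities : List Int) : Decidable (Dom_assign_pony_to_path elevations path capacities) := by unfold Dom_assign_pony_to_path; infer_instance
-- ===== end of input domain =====

-- B drops A's sort-then-linear-scan: for each segment it takes min(eligible pairs, key=sum, default=None)
-- over the unsorted pair list directly (objective: simpler; no speed claim).

-- ===== PORT A =====

-- elevations[rc[0]][rc[1]]; default 0 is never reached inside Pre_ (Python raises there)
def pvElevAt (elevations : List (List Int)) (rc : Int × Int) : Int :=
  PySem.List.pyGetD (PySem.List.pyGetD elevations rc.1 []) rc.2 0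

-- A's inner 'for pair in sorted_pd' loop with its two breaks; lastSum = sum(sorted_pd[-1]).
-- 'some v' = the loop appended v and broke; 'none' = the loop fell through without appending.
def pvInner (pd : List (Int × Int)) (lastSum e : Int) : Option (Option (Int × Int)) :=
  match pd with
  | [] => none
  | p :: rest =>
    if p.1 + p.2 ≥ e then some (some p)
    else if lastSum < e then some none
    else pvInner rest lastSum e

def assign_pony_to_path (elevations : List (List Int)) (path : List (Int × Int)) (capacities : List Int) : List (Option (Int × Int)) :=
  let x := PySem.List.pyGetD capacities 0 0
  let y := PySem.List.pyGetD capacities 1 0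
  let z := PySem.List.pyGetD capacities 2 0
  let pony_pairs : List (Int × Int) := [(x, x), (x, y), (y, y), (x, z), (y, z), (z, z)]
  let sorted_pd := PySem.List.sorted pony_pairs (fun p => p.1 + p.2)
  let relative_elevations :=
    (PySem.List.pyRange 0 ((path.length : Int) - 1)).foldl (fun acc i =>
      acc ++ [pvElevAt elevations (PySem.List.pyGetD path (i + 1) (0, 0))
              - pvElevAt elevations (PySem.List.pyGetD path i (0, 0))]) []
  let lastSum := (PySem.List.pyGetD sorted_pd (-1) (0, 0)).1 + (PySem.List.pyGetD sorted_pd (-1) (0, 0)).2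
  relative_elevations.foldl (fun acc e =>
    match pvInner sorted_pd lastSum e with
    | some v => acc ++ [v]
    | none => acc) []

-- ===== PORT B =====

def assign_pony_to_path_alt (elevations : List (List Int)) (path : List (Int × Int)) (capacities : List Int) : List (Option (Int × Int)) :=
  let x := PySem.List.pyGetD capacities 0 0
  let y := PySem.List.pyGetD capacities 1 0
  let z := PySem.List.pyGetD capacities 2 0
  let pony_pairs : List (Int × Int) := [(x, x), (x, y), (y, y), (x, z), (y, z), (z, z)]
  (PySem.List.pyRange 0 ((path.length : Int) - 1)).foldl (fun acc i =>
    let e := pvElevAt elevations (PySem.List.pyGetD path (i + 1) (0, 0))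
             - pvElevAt elevations (PySem.List.pyGetD path i (0, 0))
    acc ++ [PySem.List.min? (pony_pairs.filter (fun p => p.1 + p.2 ≥ e)) (fun p => p.1 + p.2)]) []

-- ===== PRECONDITION & SPEC =====
-- Pre_ excludes exactly where Python A raises: capacities shorter than 3 (IndexError on capacities[2]),
-- and, when the path has at least two cells (so every cell is indexed), any cell whose coordinates are
-- not valid Python indices into elevations (IndexError).
def Pre_assign_pony_to_path (elevations : List (List Int)) (path : List (Int × Int)) (capacities : List Int) : Prop :=
  3 ≤ capacities.length ∧
  (2 ≤ path.length → ∀ rc ∈ path,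
    ((PySem.List.pyGet? elevations rc.1).bind (fun row => PySem.List.pyGet? row rc.2)).isSome = true)
instance (elevations : List (List Int)) (path : List (Int × Int)) (capacities : List Int) : Decidable (Pre_assign_pony_to_path elevations path capacities) := by unfold Pre_assign_pony_to_path; infer_instance

def pvWitness_assign_pony_to_path : List (List Int) × (List (Int × Int)) × List Int :=
  ([[0, 5], [3, 1]], [(0, 0), (1, 1), (0, 1)], [1, 2, 4])

def Spec_assign_pony_to_path (elevations : List (List Int)) (path : List (Int × Int)) (capacities : List Int) (out : List (Option (Int × Int))) : Prop := out = assign_pony_to_path_alt elevations path capacities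
instance (elevations : List (List Int)) (path : List (Int × Int)) (capacities : List Int) (out : List (Option (Int × Int))) : Decidable (Spec_assign_pony_to_path elevations path capacities out) := by unfold Spec_assign_pony_to_path; infer_instance

-- ===== CLAIM (what is proved, stated in full; the proofs are below) =====
def Claim_equal_assign_pony_to_path : Prop := ∀ (elevations : List (List Int)) (path : List (Int × Int)) (capacities : List Int), Dom_assign_pony_to_path elevations path capacities → Pre_assign_pony_to_path elevations path capacities → Spec_assign_pony_to_path elevations path capacities (assign_pony_to_path elevations path capacities)

-- ===== LEMMAS AND PROOFS =====

-- in a key-nondecreasing list the last element has maximal key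
theorem pvKeyLe_getLast {α : Type} (k : α → Int) (l : List α) (h : l ≠ [])
    (hp : l.Pairwise (fun a b => k a ≤ k b)) : ∀ q ∈ l, k q ≤ k (l.getLast h) := by
  induction l with
  | nil => simp at h
  | cons a t ih =>
    intro q hq
    rcases List.pairwise_cons.mp hp with ⟨ha, ht⟩
    cases t with
    | nil =>
      have hqa : q = a := by simpa using hq
      subst hqa
      simp [List.getLast]
    | cons b t' =>
      have hlast : (a :: b :: t').getLast h = (b :: t').getLast (by simp) := by
        simp [List.getLast]
      rw [hlast]
      rcases List.mem_cons.mp hq with hq | hq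
      · subst hq
        exact le_trans (ha b (by simp)) (ih (by simp) ht b (by simp))
      · exact ih (by simp) ht q hq

-- A's inner loop returns 'some (first pair with sum ≥ e)' (None when even the largest sum is < e),
-- provided lastSum is the key of the last element and bounds every key.
theorem pvInner_eq_find (e lastSum : Int) (pd : List (Int × Int)) (h : pd ≠ [])
    (hmax : ∀ q ∈ pd, q.1 + q.2 ≤ lastSum)
    (hlast : lastSum = (pd.getLast h).1 + (pd.getLast h).2) :
    pvInner pd lastSum e = some (pd.find? (fun p => p.1 + p.2 ≥ e)) := by
  induction pd with
  | nil => simp at h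
  | cons p rest ih =>
    by_cases hp : p.1 + p.2 ≥ e
    · simp [pvInner, List.find?, hp]
    · cases rest with
      | nil =>
        have : lastSum < e := by
          simp [List.getLast] at hlast
          omega
        simp [pvInner, List.find?, hp, this]
      | cons b t =>
        by_cases hl : lastSum < e
        · have hnone : (p :: b :: t).find? (fun q => q.1 + q.2 ≥ e) = none := by
            apply List.find?_eq_none.mpr
            intro q hq
            have := hmax q hq
            simp only [decide_eq_true_eq]
            omega
          simp [pvInner, hp, hl, hnone]
        · have hrest : (b :: t).getLast (by simp) = (p :: b :: t).getLast h := by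
            simp [List.getLast]
          rw [show pvInner (p :: b :: t) lastSum e = pvInner (b :: t) lastSum e by
                simp [pvInner, hp, hl]]
          rw [ih (by simp) (fun q hq => hmax q (by simp [hq])) (by rw [hrest]; exact hlast)]
          simp [List.find?, hp]

-- insertBy with the sorted-order test keeps the list key-nondecreasing
theorem pvInsertBy_pairwise {α : Type} (k : α → Int) (x : α) (acc : List α)
    (hp : acc.Pairwise (fun a b => k a ≤ k b)) :
    (PySem.List.insertBy (fun a b => decide (k a < k b)) x acc).Pairwise (fun a b => k a ≤ k b) := by
  induction acc with
  | nil => simp [PySem.List.insertBy]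
  | cons y ys ih =>
    rcases List.pairwise_cons.mp hp with ⟨hy, hys⟩
    by_cases hlt : k x < k y
    · simp only [PySem.List.insertBy, hlt, decide_true, if_true]
      refine List.pairwise_cons.mpr ⟨?_, hp⟩
      intro b hb
      rcases List.mem_cons.mp hb with hb | hb
      · subst hb; exact le_of_lt hlt
      · exact le_trans (le_of_lt hlt) (hy b hb)
    · simp only [PySem.List.insertBy, hlt, decide_false, Bool.false_eq_true, if_false]
      refine List.pairwise_cons.mpr ⟨?_, ih hys⟩
      intro b hb
      rcases (PySem.List.mem_insertBy (fun a b => decide (k a < k b)) x b ys).mp hb with hb | hb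
      · subst hb; exact not_lt.mp hlt
      · exact hy b hb

-- one insertBy step, seen through find?-of-eligible: exactly min?'s fold step
theorem pvFind_insertBy (e : Int) {α : Type} (k : α → Int) (x : α) (acc : List α)
    (hp : acc.Pairwise (fun a b => k a ≤ k b)) :
    (PySem.List.insertBy (fun a b => decide (k a < k b)) x acc).find? (fun p => k p ≥ e)
      = if k x ≥ e then
          (match acc.find? (fun p => k p ≥ e) with
           | none => some x
           | some m => if k x < k m then some x else some m)
        else acc.find? (fun p => k p ≥ e) := by
  induction acc with
  | nil =>
    by_cases hx : k x ≥ e <;> simp [PySem.List.insertBy, List.find?, hx]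
  | cons y ys ih =>
    rcases List.pairwise_cons.mp hp with ⟨hy, hys⟩
    by_cases hlt : k x < k y
    · -- x inserted in front of y
      simp only [PySem.List.insertBy, hlt, decide_true, if_true]
      by_cases hx : k x ≥ e
      · by_cases hey : k y ≥ e
        · simp [List.find?, hx, hey, hlt]
        · -- y ineligible but k x < k y and e ≤ k x gives e ≤ k y: contradiction
          omega
      · by_cases hey : k y ≥ e
        · simp [List.find?, hx, hey]
        · simp [List.find?, hx, hey]
    · simp only [PySem.List.insertBy, hlt, decide_false, Bool.false_eq_true, if_false]
      by_cases hey : k y ≥ e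
      · -- y eligible and k y ≤ k x, so x (if eligible) never beats y
        by_cases hx : k x ≥ e
        · simp [List.find?, hey, hx]
          omega
        · simp [List.find?, hey, hx]
      · -- y ineligible: find? skips it on both sides
        by_cases hx : k x ≥ e
        · simp [List.find?, hey, hx, ih hys]
        · simp [List.find?, hey, hx, ih hys]

-- the foldl-insertBy invariant: find?-of-eligible over the accumulator evolves as min? over the filtered input
theorem pvFold_invariant (e : Int) {α : Type} (k : α → Int) (l acc : List α)
    (hp : acc.Pairwise (fun a b => k a ≤ k b)) :
    (l.foldl (fun acc x => PySem.List.insertBy (fun a b => decide (k a < k b)) x acc) acc).find? (fun p => k p ≥ e)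
      = (l.filter (fun p => k p ≥ e)).foldl
          (fun m x => match m with
            | none => some x
            | some m' => if k x < k m' then some x else some m')
          (acc.find? (fun p => k p ≥ e)) := by
  induction l generalizing acc with
  | nil => simp
  | cons x t ih =>
    simp only [List.foldl_cons]
    rw [ih _ (pvInsertBy_pairwise k x acc hp), pvFind_insertBy e k x acc hp]
    by_cases hx : k x ≥ e
    · simp [List.filter, hx]
    · simp [List.filter, hx]

-- first eligible pair of the stably sorted list = min(eligible pairs, key) of the original list
theorem pvFind_sorted_eq_min (e : Int) {α : Type} (k : α → Int) (xs : List α) :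
    (PySem.List.sorted xs k false).find? (fun p => k p ≥ e)
      = PySem.List.min? (xs.filter (fun p => k p ≥ e)) k := by
  rw [PySem.List.sorted_eq_foldl_insertBy]
  rw [pvFold_invariant e k xs [] (by simp)]
  simp only [PySem.List.min?, List.find?]
  rfl

-- ===== VERDICT (by name: the statement is the Claim_ definition above) =====

theorem assign_pony_to_path_spec : Claim_equal_assign_pony_to_path := by
  unfold Claim_equal_assign_pony_to_path
  intro elevations path capacities _ _
  unfold Spec_assign_pony_to_path assign_pony_to_path assign_pony_to_path_alt
  simp only []
  set x := PySem.List.pyGetD capacities 0 0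
  set y := PySem.List.pyGetD capacities 1 0
  set z := PySem.List.pyGetD capacities 2 0
  set pony_pairs : List (Int × Int) := [(x, x), (x, y), (y, y), (x, z), (y, z), (z, z)] with hpp
  set k : Int × Int → Int := fun p => p.1 + p.2 with hk
  set sorted_pd := PySem.List.sorted pony_pairs (fun p => p.1 + p.2) with hs
  have hne : sorted_pd ≠ [] := by
    rw [hs]
    intro hcon
    have := (PySem.List.sorted_eq_nil_iff (xs := pony_pairs) (key := fun p => p.1 + p.2) (rev := false)).mp hcon
    simp [hpp] at this
  have hlastD : PySem.List.pyGetD sorted_pd (-1) (0, 0) = sorted_pd.getLast hne :=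
    PySem.List.pyGetD_neg_one sorted_pd (0, 0) hne
  have hpair : sorted_pd.Pairwise (fun a b => a.1 + a.2 ≤ b.1 + b.2) := by
    rw [hs]; exact PySem.List.sorted_pairwise pony_pairs (fun p => p.1 + p.2)
  -- each segment's appended value agrees
  have hstep : ∀ e : Int,
      pvInner sorted_pd ((PySem.List.pyGetD sorted_pd (-1) (0, 0)).1 + (PySem.List.pyGetD sorted_pd (-1) (0, 0)).2) e
        = some (PySem.List.min? (pony_pairs.filter (fun p => p.1 + p.2 ≥ e)) (fun p => p.1 + p.2)) := by
    intro e
    rw [hlastD]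
    rw [pvInner_eq_find e _ sorted_pd hne
        (fun q hq => pvKeyLe_getLast (fun p => p.1 + p.2) sorted_pd hne hpair q hq) rfl]
    rw [show sorted_pd.find? (fun p => p.1 + p.2 ≥ e)
          = PySem.List.min? (pony_pairs.filter (fun p => p.1 + p.2 ≥ e)) (fun p => p.1 + p.2) from by
      rw [hs]; exact pvFind_sorted_eq_min e (fun p => p.1 + p.2) pony_pairs]
  -- turn A's two loops into B's single loop
  simp only [hstep]
  simp only [PySem.List.foldl_append_singleton_eq_map, List.nil_append, List.map_map]
  rfl
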